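-- pv_equiv track=rewrite | github.com/shubham-calfus/ptr | src/runtime/parameterization.py | normalize_param_name
-- ===== SOURCE A (Python) =====
-- def normalize_param_name(name: str) -> str:
--     """Convert labels like 'Receipt Number' into stable parameter keys."""
--     collapsed: list[str] = []
--     last_was_separator = False
--
--     for char in str(name or "").lower():
--         if char.isalnum():
--             collapsed.append(char)
--             last_was_separator = False
--             continue
--         if collapsed and not last_was_separator:
--             collapsed.append("_")
--             last_was_separator = True
--
--     normalized = "".join(collapsed).strip("_")
--     aliases = {
--         "starturl": "url",
--         "start_url": "url",
--     }
--     return aliases.get(normalized, normalized)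
-- ===== SOURCE B (Python) =====
-- from itertools import groupby
--
--
-- def normalize_param_name(name: str) -> str:
--     s = str(name or "").lower()
--     tokens = ["".join(g) for k, g in groupby(s, key=str.isalnum) if k]
--     normalized = "_".join(tokens)
--     aliases = {"starturl": "url", "start_url": "url"}
--     return aliases.get(normalized, normalized)
-- ===== Notes on version B (the rewrite author's own statement) =====
-- stated objective: idiomatic
-- what changed: Replaces A's character-by-character accumulation with a last_was_separator flag plus a final strip('_') by a tokenize-then-join decomposition: itertools.groupby splits the lowered string into alnum runs, and '_'.join of those runs inherently collapses and strips separators; the alias lookup is kept.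
import Mathlib
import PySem

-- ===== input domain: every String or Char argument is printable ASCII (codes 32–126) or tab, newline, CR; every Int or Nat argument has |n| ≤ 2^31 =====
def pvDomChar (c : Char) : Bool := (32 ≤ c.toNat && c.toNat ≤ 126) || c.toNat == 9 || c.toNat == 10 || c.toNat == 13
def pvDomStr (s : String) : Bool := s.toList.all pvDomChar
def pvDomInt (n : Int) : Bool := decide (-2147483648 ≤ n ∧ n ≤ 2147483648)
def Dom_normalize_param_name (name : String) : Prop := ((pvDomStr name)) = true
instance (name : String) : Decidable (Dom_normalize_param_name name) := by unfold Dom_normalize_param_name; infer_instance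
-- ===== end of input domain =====

-- B replaces A's char-by-char loop with a last_was_separator flag by tokenize (groupby alnum runs)
-- then '_'.join — same return value, objective: idiomatic.

-- ===== PORT A =====
def npnStepA (st : List Char × Bool) (c : Char) : List Char × Bool :=
  if PySem.Chars.isalnum c then (st.1 ++ [c], false)
  else if !st.1.isEmpty && !st.2 then (st.1 ++ ['_'], true)
  else st

def normalize_param_name (name : String) : String :=
  -- str(name or "") = name for a string argument; .lower(); loop with flag; strip('_'); alias lookup
  let st := (PySem.Chars.lower name.toList).foldl npnStepA ([], false)
  let normalized := String.mk (PySem.Chars.stripChars st.1 ['_'])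
  let aliases : PySem.Dict String String :=
    PySem.Dict.ofList [("starturl", "url"), ("start_url", "url")]
  PySem.Dict.getD aliases normalized normalized

-- ===== PORT B =====
-- itertools.groupby(s, key=str.isalnum): one pass, maximal runs of equal key
def npnGroupsGo : List Char → Bool → List Char → List (List Char)
  | [], _, cur => [cur.reverse]
  | c :: rest, k, cur =>
    if PySem.Chars.isalnum c == k then npnGroupsGo rest k (c :: cur)
    else cur.reverse :: npnGroupsGo rest (PySem.Chars.isalnum c) [c]

def npnGroups : List Char → List (List Char)
  | [] => []
  | c :: rest => npnGroupsGo rest (PySem.Chars.isalnum c) [c]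

def normalize_param_name_alt (name : String) : String :=
  let tokens := (npnGroups (PySem.Chars.lower name.toList)).filter
      (fun g => match g with | [] => false | c :: _ => PySem.Chars.isalnum c)
  let normalized := String.mk (PySem.Chars.join ['_'] tokens)
  let aliases : PySem.Dict String String :=
    PySem.Dict.ofList [("starturl", "url"), ("start_url", "url")]
  PySem.Dict.getD aliases normalized normalized

-- ===== PRECONDITION & SPEC =====
def Spec_normalize_param_name (name : String) (out : String) : Prop := out = normalize_param_name_alt name
instance (name : String) (out : String) : Decidable (Spec_normalize_param_name name out) := by unfold Spec_normalize_param_name; infer_instance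

-- ===== CLAIM (what is proved, stated in full; the proofs are below) =====
def Claim_equal_normalize_param_name : Prop := ∀ (name : String), Dom_normalize_param_name name → Spec_normalize_param_name name (normalize_param_name name)

-- ===== LEMMAS AND PROOFS =====

-- state machines extracted from A's fold: npn0 = nothing emitted yet / just after a separator,
-- npnA = just after an alnum char
mutual
def npn0 : List Char → List Char
  | [] => []
  | c :: r => if PySem.Chars.isalnum c then c :: npnA r else npn0 r
def npnA : List Char → List Char
  | [] => []
  | c :: r => if PySem.Chars.isalnum c then c :: npnA r else '_' :: npn0 r
end

def npnTokens (cs : List Char) : List (List Char) :=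
  (npnGroups cs).filter (fun g => match g with | [] => false | c :: _ => PySem.Chars.isalnum c)

def npnJ (cs : List Char) : List Char := PySem.Chars.join ['_'] (npnTokens cs)

def npnGroupsSpan : List Char → List (List Char)
  | [] => []
  | c :: rest =>
    (c :: rest.takeWhile (fun x => PySem.Chars.isalnum x == PySem.Chars.isalnum c))
      :: npnGroupsSpan (rest.dropWhile (fun x => PySem.Chars.isalnum x == PySem.Chars.isalnum c))
termination_by cs => cs.length
decreasing_by
  simp only [List.length_cons]
  exact Nat.lt_succ_of_le (List.length_dropWhile_le _ _)

theorem npnGroupsGo_spec : ∀ (rest : List Char) (k : Bool) (cur : List Char),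
    npnGroupsGo rest k cur =
      (cur.reverse ++ rest.takeWhile (fun x => PySem.Chars.isalnum x == k))
        :: npnGroupsSpan (rest.dropWhile (fun x => PySem.Chars.isalnum x == k)) := by
  intro rest
  induction rest with
  | nil => intro k cur; simp [npnGroupsGo, npnGroupsSpan]
  | cons c rest ih =>
    intro k cur
    by_cases hk : (PySem.Chars.isalnum c == k) = true
    · simp only [npnGroupsGo, hk, if_pos]
      rw [ih k (c :: cur)]
      simp [List.takeWhile_cons, List.dropWhile_cons, hk]
    · have hk' : (PySem.Chars.isalnum c == k) = false := by simpa using hk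
      simp only [npnGroupsGo, hk', Bool.false_eq_true, if_false]
      rw [ih (PySem.Chars.isalnum c) [c]]
      simp only [List.takeWhile_cons, List.dropWhile_cons, hk', Bool.false_eq_true, if_false]
      rw [npnGroupsSpan]
      simp

theorem npnGroups_eq_span (cs : List Char) : npnGroups cs = npnGroupsSpan cs := by
  cases cs with
  | nil => simp [npnGroups, npnGroupsSpan]
  | cons c rest =>
    rw [npnGroups, npnGroupsGo_spec, npnGroupsSpan]
    simp

theorem npn_foldA (cs : List Char) : ∀ acc : List Char, acc ≠ [] →
    (cs.foldl npnStepA (acc, false)).1 = acc ++ npnA cs ∧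
    (cs.foldl npnStepA (acc, true)).1 = acc ++ npn0 cs := by
  induction cs with
  | nil => intro acc h; simp [npnA, npn0]
  | cons c r ih =>
    intro acc h
    have hne : acc.isEmpty = false := by simpa [List.isEmpty_iff] using h
    by_cases hc : PySem.Chars.isalnum c = true
    · constructor
      · simp only [List.foldl_cons, npnStepA, hc, if_pos]
        rw [(ih (acc ++ [c]) (by simp)).1]
        simp [npnA, hc]
      · simp only [List.foldl_cons, npnStepA, hc, if_pos]
        rw [(ih (acc ++ [c]) (by simp)).1]
        simp [npn0, hc]
    · have hc' : PySem.Chars.isalnum c = false := by simpa using hc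
      constructor
      · simp only [List.foldl_cons, npnStepA, hc', hne]
        simp only [Bool.false_eq_true, if_false, Bool.not_false, Bool.and_self, if_true]
        rw [(ih (acc ++ ['_']) (by simp)).2]
        simp [npnA, hc']
      · simp only [List.foldl_cons, npnStepA, hc', hne]
        simp only [Bool.false_eq_true, if_false, Bool.not_true, Bool.and_false]
        rw [(ih acc h).2]
        simp [npn0, hc']

theorem npn_fold0 (cs : List Char) : (cs.foldl npnStepA ([], false)).1 = npn0 cs := by
  induction cs with
  | nil => simp [npn0]
  | cons c r ih =>
    by_cases hc : PySem.Chars.isalnum c = true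
    · simp only [List.foldl_cons, npnStepA, hc, if_pos, List.nil_append]
      rw [(npn_foldA r [c] (by simp)).1]
      simp [npn0, hc]
    · have hc' : PySem.Chars.isalnum c = false := by simpa using hc
      simp only [List.foldl_cons, npnStepA, hc', List.isEmpty_nil, Bool.not_true,
        Bool.false_and, Bool.false_eq_true, if_false]
      rw [ih]
      simp [npn0, hc']

theorem npn_groupsSpan_ne_nil (cs : List Char) : ∀ g ∈ npnGroupsSpan cs, g ≠ [] := by
  induction cs using npnGroupsSpan.induct with
  | case1 => intro g hg; simp [npnGroupsSpan] at hg
  | case2 c rest ih =>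
    intro g hg
    rw [npnGroupsSpan] at hg
    rcases List.mem_cons.mp hg with h | h
    · subst h; simp
    · exact ih g h

theorem npn_groups_ne_nil (cs : List Char) : ∀ g ∈ npnGroups cs, g ≠ [] := by
  rw [npnGroups_eq_span]
  exact npn_groupsSpan_ne_nil cs

theorem npn_groups_cons_pos (c : Char) (r : List Char) (hc : PySem.Chars.isalnum c = true) :
    npnGroups (c :: r) = (c :: r.takeWhile (fun x => PySem.Chars.isalnum x))
      :: npnGroups (r.dropWhile (fun x => PySem.Chars.isalnum x)) := by
  simp only [npnGroups_eq_span]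
  rw [npnGroupsSpan]; simp [hc]

theorem npn_groups_cons_neg (c : Char) (r : List Char) (hc : PySem.Chars.isalnum c = false) :
    npnGroups (c :: r) = (c :: r.takeWhile (fun x => !PySem.Chars.isalnum x))
      :: npnGroups (r.dropWhile (fun x => !PySem.Chars.isalnum x)) := by
  simp only [npnGroups_eq_span]
  rw [npnGroupsSpan]; simp [hc]

theorem npn_tokens_cons_pos (c : Char) (r : List Char) (hc : PySem.Chars.isalnum c = true) :
    npnTokens (c :: r) = (c :: r.takeWhile (fun x => PySem.Chars.isalnum x))
      :: npnTokens (r.dropWhile (fun x => PySem.Chars.isalnum x)) := by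
  unfold npnTokens
  rw [npn_groups_cons_pos c r hc]
  simp [hc]

theorem npn_tokens_cons_neg (c : Char) (r : List Char) (hc : PySem.Chars.isalnum c = false) :
    npnTokens (c :: r) = npnTokens (r.dropWhile (fun x => !PySem.Chars.isalnum x)) := by
  unfold npnTokens
  rw [npn_groups_cons_neg c r hc]
  simp [hc]

theorem npnA_alnum_prefix (t : List Char) : ∀ z, (∀ x ∈ t, PySem.Chars.isalnum x = true) →
    npnA (t ++ z) = t ++ npnA z := by
  induction t with
  | nil => intro z _; simp
  | cons a t ih =>
    intro z h
    have ha := h a (by simp)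
    simp only [List.cons_append, npnA, ha, if_pos]
    rw [ih z (fun x hx => h x (by simp [hx]))]

theorem npn0_nonal_prefix (t : List Char) : ∀ z, (∀ x ∈ t, PySem.Chars.isalnum x = false) →
    npn0 (t ++ z) = npn0 z := by
  induction t with
  | nil => intro z _; simp
  | cons a t ih =>
    intro z h
    have ha := h a (by simp)
    simp only [List.cons_append, npn0, ha]
    simp only [Bool.false_eq_true, if_false]
    exact ih z (fun x hx => h x (by simp [hx]))

theorem npn_dropWhile_head_false {p : Char → Bool} (l : List Char) :
    ∀ c r, l.dropWhile p = c :: r → p c = false := by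
  induction l with
  | nil => intro c r h; simp at h
  | cons a t ih =>
    intro c r h
    by_cases hp : p a = true
    · rw [List.dropWhile_cons_of_pos hp] at h; exact ih c r h
    · rw [List.dropWhile_cons_of_neg hp] at h
      cases h; simpa using hp

theorem npn_getLast?_mem {l : List Char} {a : Char} (h : l.getLast? = some a) : a ∈ l := by
  obtain ⟨l', rfl⟩ := List.getLast?_eq_some_iff.mp h
  simp

theorem npnJ_nil : npnJ ([] : List Char) = [] := by
  simp [npnJ, npnTokens, npnGroups, PySem.Chars.join, List.intercalate]

theorem npnJ_singleton (g : List Char) : PySem.Chars.join ['_'] [g] = g := by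
  simp [PySem.Chars.join, List.intercalate]

theorem npnJ_cons_cons (g h : List Char) (l : List (List Char)) :
    PySem.Chars.join ['_'] (g :: h :: l) = g ++ '_' :: PySem.Chars.join ['_'] (h :: l) := by
  rw [PySem.Chars.join_cons_cons]
  simp

-- the combined invariant: npn0 equals the joined tokens, up to one trailing '_',
-- and the joined tokens start and end with an alnum char
theorem npnL : ∀ n : Nat, ∀ cs : List Char, cs.length ≤ n →
    (npn0 cs = npnJ cs ∨ (npnJ cs ≠ [] ∧ npn0 cs = npnJ cs ++ ['_'])) ∧
    (∀ x, (npnJ cs).head? = some x → PySem.Chars.isalnum x = true) ∧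
    (∀ x, (npnJ cs).getLast? = some x → PySem.Chars.isalnum x = true) := by
  intro n
  induction n with
  | zero =>
    intro cs hlen
    have hnil : cs = [] := by
      cases cs with
      | nil => rfl
      | cons a b => simp at hlen
    subst hnil
    exact ⟨Or.inl (by rw [npnJ_nil]; simp [npn0]), by simp [npnJ_nil], by simp [npnJ_nil]⟩
  | succ n ih =>
    intro cs hlen
    cases cs with
    | nil =>
      exact ⟨Or.inl (by rw [npnJ_nil]; simp [npn0]), by simp [npnJ_nil], by simp [npnJ_nil]⟩
    | cons c r =>
      by_cases hc : PySem.Chars.isalnum c = true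
      · -- alnum head: first group is an alnum run and is kept
        have hr : r.takeWhile (fun x => PySem.Chars.isalnum x) ++
            r.dropWhile (fun x => PySem.Chars.isalnum x) = r := List.takeWhile_append_dropWhile
        have htall : ∀ x ∈ r.takeWhile (fun x => PySem.Chars.isalnum x),
            PySem.Chars.isalnum x = true := fun x hx => List.mem_takeWhile_imp hx
        have hdlen : (r.dropWhile (fun x => PySem.Chars.isalnum x)).length ≤ n := by
          have h1 := List.length_dropWhile_le (fun x => PySem.Chars.isalnum x) r
          simp only [List.length_cons] at hlen
          omega
        obtain ⟨ihd, ihh, ihl⟩ := ih (r.dropWhile (fun x => PySem.Chars.isalnum x)) hdlen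
        have h0 : npn0 (c :: r) = c :: (r.takeWhile (fun x => PySem.Chars.isalnum x) ++
            npnA (r.dropWhile (fun x => PySem.Chars.isalnum x))) := by
          have hAr : npnA r = r.takeWhile (fun x => PySem.Chars.isalnum x) ++
              npnA (r.dropWhile (fun x => PySem.Chars.isalnum x)) := by
            conv_lhs => rw [← hr]
            exact npnA_alnum_prefix _ _ htall
          simp [npn0, hc, hAr]
        have hTok := npn_tokens_cons_pos c r hc
        cases hdd : r.dropWhile (fun x => PySem.Chars.isalnum x) with
        | nil =>
          have hJ : npnJ (c :: r) = c :: r.takeWhile (fun x => PySem.Chars.isalnum x) := by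
            rw [npnJ, hTok, hdd]
            rw [show npnTokens [] = [] from by simp [npnTokens, npnGroups]]
            exact npnJ_singleton _
          refine ⟨Or.inl ?_, ?_, ?_⟩
          · rw [h0, hdd, hJ]; simp [npnA]
          · intro x hx; rw [hJ] at hx; simp at hx; subst hx; exact hc
          · intro x hx
            rw [hJ] at hx
            rcases List.mem_cons.mp (npn_getLast?_mem hx) with h | h
            · rw [h]; exact hc
            · exact htall x h
        | cons c' r'' =>
          have hc' : PySem.Chars.isalnum c' = false := by
            have := npn_dropWhile_head_false (p := fun x => PySem.Chars.isalnum x) r c' r'' hdd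
            simpa using this
          have hA : npnA (r.dropWhile (fun x => PySem.Chars.isalnum x)) =
              '_' :: npn0 (r.dropWhile (fun x => PySem.Chars.isalnum x)) := by
            rw [hdd]; simp [npnA, npn0, hc']
          cases hTd : npnTokens (r.dropWhile (fun x => PySem.Chars.isalnum x)) with
          | nil =>
            have hJd : npnJ (r.dropWhile (fun x => PySem.Chars.isalnum x)) = [] := by
              rw [npnJ, hTd]; simp [PySem.Chars.join, List.intercalate]
            have h0dnil : npn0 (r.dropWhile (fun x => PySem.Chars.isalnum x)) = [] := by
              rcases ihd with h | ⟨hne, _⟩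
              · rw [h, hJd]
              · exact absurd hJd hne
            have hJ : npnJ (c :: r) = c :: r.takeWhile (fun x => PySem.Chars.isalnum x) := by
              rw [npnJ, hTok, hTd]; exact npnJ_singleton _
            refine ⟨Or.inr ⟨by rw [hJ]; simp, ?_⟩, ?_, ?_⟩
            · rw [h0, hA, h0dnil, hJ]; simp
            · intro x hx; rw [hJ] at hx; simp at hx; subst hx; exact hc
            · intro x hx
              rw [hJ] at hx
              rcases List.mem_cons.mp (npn_getLast?_mem hx) with h | h
              · rw [h]; exact hc
              · exact htall x h
          | cons g gs =>
            have hgmem : g ∈ npnGroups (r.dropWhile (fun x => PySem.Chars.isalnum x)) := by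
              have : g ∈ npnTokens (r.dropWhile (fun x => PySem.Chars.isalnum x)) := by
                rw [hTd]; simp
              exact List.mem_of_mem_filter this
            have hgne : g ≠ [] := npn_groups_ne_nil _ g hgmem
            have hJd_ne : npnJ (r.dropWhile (fun x => PySem.Chars.isalnum x)) ≠ [] := by
              rw [npnJ, hTd]
              cases gs with
              | nil => rw [npnJ_singleton]; exact hgne
              | cons h l =>
                rw [npnJ_cons_cons]
                cases g with
                | nil => exact absurd rfl hgne
                | cons y ys => simp
            have hJ : npnJ (c :: r) = (c :: r.takeWhile (fun x => PySem.Chars.isalnum x)) ++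
                '_' :: npnJ (r.dropWhile (fun x => PySem.Chars.isalnum x)) := by
              rw [npnJ, hTok, hTd, npnJ_cons_cons, npnJ, hTd]
            have h0' : npn0 (c :: r) = (c :: r.takeWhile (fun x => PySem.Chars.isalnum x)) ++
                '_' :: npn0 (r.dropWhile (fun x => PySem.Chars.isalnum x)) := by
              rw [h0, hA]; simp
            have hJ2 : npnJ (c :: r) = (c :: r.takeWhile (fun x => PySem.Chars.isalnum x)
                ++ ['_']) ++ npnJ (r.dropWhile (fun x => PySem.Chars.isalnum x)) := by
              rw [hJ]; simp
            refine ⟨?_, ?_, ?_⟩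
            · rcases ihd with h | ⟨hne, h⟩
              · exact Or.inl (by rw [h0', hJ, h])
              · refine Or.inr ⟨by rw [hJ]; simp, ?_⟩
                rw [h0', hJ, h]; simp
            · intro x hx; rw [hJ] at hx; simp at hx; subst hx; exact hc
            · intro x hx
              rw [hJ2, List.getLast?_append_of_ne_nil _ hJd_ne] at hx
              exact ihl x hx
      · -- non-alnum head: first group is a separator run and is dropped
        have hc' : PySem.Chars.isalnum c = false := by simpa using hc
        have hr : r.takeWhile (fun x => !PySem.Chars.isalnum x) ++
            r.dropWhile (fun x => !PySem.Chars.isalnum x) = r := List.takeWhile_append_dropWhile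
        have htall : ∀ x ∈ r.takeWhile (fun x => !PySem.Chars.isalnum x),
            PySem.Chars.isalnum x = false := by
          intro x hx
          have := List.mem_takeWhile_imp hx
          simpa using this
        have hdlen : (r.dropWhile (fun x => !PySem.Chars.isalnum x)).length ≤ n := by
          have h1 := List.length_dropWhile_le (fun x => !PySem.Chars.isalnum x) r
          simp only [List.length_cons] at hlen
          omega
        obtain ⟨ihd, ihh, ihl⟩ := ih (r.dropWhile (fun x => !PySem.Chars.isalnum x)) hdlen
        have h0 : npn0 (c :: r) = npn0 (r.dropWhile (fun x => !PySem.Chars.isalnum x)) := by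
          have h0r : npn0 r = npn0 (r.dropWhile (fun x => !PySem.Chars.isalnum x)) := by
            conv_lhs => rw [← hr]
            exact npn0_nonal_prefix _ _ htall
          simp [npn0, hc', h0r]
        have hJeq : npnJ (c :: r) = npnJ (r.dropWhile (fun x => !PySem.Chars.isalnum x)) := by
          rw [npnJ, npn_tokens_cons_neg c r hc', npnJ]
        refine ⟨?_, by rw [hJeq]; exact ihh, by rw [hJeq]; exact ihl⟩
        rcases ihd with h | ⟨hne, h⟩
        · exact Or.inl (by rw [h0, hJeq, h])
        · exact Or.inr ⟨by rw [hJeq]; exact hne, by rw [h0, hJeq, h]⟩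

theorem npn_alnum_ne_underscore {y : Char} (hy : PySem.Chars.isalnum y = true) : y ≠ '_' := by
  intro h
  subst h
  exact absurd hy (by decide)

theorem npn_main (cs : List Char) :
    PySem.Chars.stripChars (npn0 cs) ['_'] = npnJ cs := by
  obtain ⟨hd, hh, hl⟩ := npnL cs.length cs le_rfl
  have hstrip : ∀ l : List Char, PySem.Chars.stripChars l ['_'] =
      List.rdropWhile (fun y => (['_'] : List Char).contains y)
        (List.dropWhile (fun y => (['_'] : List Char).contains y) l) := by
    intro l
    simp [PySem.Chars.stripChars, List.rdropWhile]
  have hJdrop : List.dropWhile (fun y => (['_'] : List Char).contains y) (npnJ cs) = npnJ cs := by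
    cases hJ : npnJ cs with
    | nil => simp
    | cons y ys =>
      have hy := hh y (by rw [hJ]; rfl)
      rw [List.dropWhile_cons_of_neg (by simp [npn_alnum_ne_underscore hy])]
  have hJr : List.rdropWhile (fun y => (['_'] : List Char).contains y) (npnJ cs) = npnJ cs := by
    cases hJ : (npnJ cs).getLast? with
    | none =>
      rw [List.getLast?_eq_none_iff.mp hJ]
      simp [List.rdropWhile_nil]
    | some x =>
      have hy := hl x hJ
      obtain ⟨ys, hys⟩ := List.getLast?_eq_some_iff.mp hJ
      rw [hys, List.rdropWhile_concat_neg _ _ _ (by simp [npn_alnum_ne_underscore hy])]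
  rcases hd with h | ⟨hne, h⟩
  · rw [hstrip, h, hJdrop, hJr]
  · rw [hstrip, h]
    have hdropJ : List.dropWhile (fun y => (['_'] : List Char).contains y)
        (npnJ cs ++ ['_']) = npnJ cs ++ ['_'] := by
      cases hJ : npnJ cs with
      | nil => exact absurd hJ hne
      | cons y ys =>
        have hy := hh y (by rw [hJ]; rfl)
        simp only [List.cons_append]
        rw [List.dropWhile_cons_of_neg (by simp [npn_alnum_ne_underscore hy])]
    rw [hdropJ, List.rdropWhile_concat_pos _ _ _ (by simp), hJr]

-- ===== VERDICT (by name: the statement is the Claim_ definition above) =====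
theorem normalize_param_name_spec : Claim_equal_normalize_param_name := by
  intro name _
  unfold Spec_normalize_param_name normalize_param_name normalize_param_name_alt
  simp only [npn_fold0]
  rw [npn_main]
  rfl
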